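-- pv_equiv track=rewrite | github.com/komalupatil/Leetcode_Solutions | Medium/Minimum Domino Rotations For Equal Row.py | helper
-- ===== SOURCE A (Python) =====
-- def helper(top, bottom, match):
--     count = 0
--     for i in range(len(top)):
--         if top[i] != match:
--             if bottom[i] == match:
--                 count +=1
--             else:
--                 return 30000
--     return count
-- ===== SOURCE B (Python) =====
-- def helper(top, bottom, match):
--     if not all(top[i] == match or bottom[i] == match for i in range(len(top))):
--         return 30000
--     return sum(1 for i in range(len(top)) if top[i] != match)
-- ===== Notes on version B (the rewrite author's own statement) =====
-- stated objective: alternative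
-- what changed: Replaces A's single interleaved loop with accumulator and early return by two separate passes: a short-circuiting feasibility check (all top[i]==match or bottom[i]==match) followed by a plain count of indices where top[i]!=match.
import Mathlib
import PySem

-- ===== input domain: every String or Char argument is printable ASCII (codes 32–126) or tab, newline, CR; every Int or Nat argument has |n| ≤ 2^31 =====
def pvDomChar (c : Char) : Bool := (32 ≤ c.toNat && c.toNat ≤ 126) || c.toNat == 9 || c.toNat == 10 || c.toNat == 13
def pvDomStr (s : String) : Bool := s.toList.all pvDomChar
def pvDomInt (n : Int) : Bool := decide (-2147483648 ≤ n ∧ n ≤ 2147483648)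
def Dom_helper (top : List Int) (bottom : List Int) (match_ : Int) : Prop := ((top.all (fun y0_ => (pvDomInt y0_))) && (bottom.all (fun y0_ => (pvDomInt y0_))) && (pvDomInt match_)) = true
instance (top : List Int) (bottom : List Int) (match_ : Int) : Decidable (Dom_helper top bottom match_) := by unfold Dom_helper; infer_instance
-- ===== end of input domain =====

-- B replaces A's single interleaved loop (accumulator + early return) by two separate
-- passes: a short-circuiting feasibility scan, then a plain count over top alone.
-- Equivalence of the RETURN values is proved on Pre_helper (exactly the inputs where
-- the Python raises no IndexError).

-- ===== PORT A =====
-- A's loop over i in range(len(top)), walking bottom in parallel; where Python would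
-- raise IndexError (bottom exhausted at a needed index) the port returns via the
-- default match_+1 ≠ match_ — such inputs are excluded by Pre_helper.
def helperGoA : List Int → List Int → Int → Int → Int
  | [], _, _, count => count
  | t :: ts, bs, m, count =>
    if t ≠ m then
      if bs.headD (m + 1) = m then helperGoA ts bs.tail m (count + 1)
      else 30000
    else helperGoA ts bs.tail m count

def helper (top : List Int) (bottom : List Int) (match_ : Int) : Int :=
  helperGoA top bottom match_ 0

-- ===== PORT B =====
-- pass 1: all(top[i] == match or bottom[i] == match for i in range(len(top)))
-- (same out-of-range convention as the A port: default match_+1, excluded by Pre_helper)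
def helperFeas : List Int → List Int → Int → Bool
  | [], _, _ => true
  | t :: ts, bs, m => (t = m || bs.headD (m + 1) = m) && helperFeas ts bs.tail m

-- pass 2: sum(1 for i in range(len(top)) if top[i] != match)
def helperCountNe : List Int → Int → Int
  | [], _ => 0
  | t :: ts, m => (if t ≠ m then 1 else 0) + helperCountNe ts m

def helper_alt (top : List Int) (bottom : List Int) (match_ : Int) : Int :=
  if helperFeas top bottom match_ then helperCountNe top match_ else 30000

-- ===== PRECONDITION & SPEC =====
-- Pre_helper excludes exactly the inputs on which the Python A (and the Python B)
-- raises IndexError: some index i ≥ len(bottom) with top[i] ≠ match is reached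
-- before any earlier index already forced the 30000 return.
def Pre_helper (top : List Int) (bottom : List Int) (match_ : Int) : Prop :=
  ∀ i < top.length, (bottom.length ≤ i ∧ top.getD i 0 ≠ match_) →
    ∃ j < i, j < bottom.length ∧ top.getD j 0 ≠ match_ ∧ bottom.getD j 0 ≠ match_
instance (top : List Int) (bottom : List Int) (match_ : Int) : Decidable (Pre_helper top bottom match_) := by unfold Pre_helper; infer_instance

def pvWitness_helper : List Int × List Int × Int := ([2, 1, 2], [1, 2, 1], 2)

def Spec_helper (top : List Int) (bottom : List Int) (match_ : Int) (out : Int) : Prop := out = helper_alt top bottom match_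
instance (top : List Int) (bottom : List Int) (match_ : Int) (out : Int) : Decidable (Spec_helper top bottom match_ out) := by unfold Spec_helper; infer_instance

-- ===== CLAIM (what is proved, stated in full; the proofs are below) =====
def Claim_equal_helper : Prop := ∀ (top : List Int) (bottom : List Int) (match_ : Int), Dom_helper top bottom match_ → Pre_helper top bottom match_ → Spec_helper top bottom match_ (helper top bottom match_)

-- ===== LEMMAS AND PROOFS =====
-- Loop invariant: A's interleaved loop computes B's two-pass result, for any
-- accumulator and any remaining suffixes (the two ports use the same out-of-range
-- default, so the identity holds for all inputs).
theorem helperGoA_eq (ts : List Int) : ∀ (bs : List Int) (m c : Int),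
    helperGoA ts bs m c =
      if helperFeas ts bs m then c + helperCountNe ts m else 30000 := by
  induction ts with
  | nil => intro bs m c; simp [helperGoA, helperFeas, helperCountNe]
  | cons t ts ih =>
    intro bs m c
    by_cases ht : t = m
    · simp [helperGoA, helperFeas, helperCountNe, ht, ih]
    · by_cases hb : bs.head?.getD (m + 1) = m
      · simp [helperGoA, helperFeas, helperCountNe, ht, hb, ih]
        split <;> omega
      · simp [helperGoA, helperFeas, ht, hb]

-- ===== VERDICT (by name: the statement is the Claim_ definition above) =====
theorem helper_spec : Claim_equal_helper := by
  intro top bottom match_ _ _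
  unfold Spec_helper helper helper_alt
  rw [helperGoA_eq]
  simp
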